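-- pv_equiv track=rewrite | github.com/limdongsun0814/Algorithm | 프로그래머스/3/150367. 표현 가능한 이진트리/표현 가능한 이진트리.py | dfs
-- ===== SOURCE A (Python) =====
-- def dfs(value):
--     n=len(value)
--     if n>=1:
--         if value[n//2]=="0":
--             if "0"*n!=value:
--                 return True
--         else:
--             left=value[:n//2]
--             right=value[n//2+1:]
--             flag = dfs(left)
--             if flag:
--                 return True
--             flag = dfs(right)
--             if flag:
--                 return True
-- ===== SOURCE B (Python) =====
-- def dfs(value):
--     # same result as A, by recursing on index bounds with a prefix
--     # count of '0's so each all-zero check is O(1) and no substring is copied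
--     n = len(value)
--     pref = [0] * (n + 1)
--     for i, c in enumerate(value):
--         pref[i + 1] = pref[i] + (c == "0")
--
--     def bad(lo, hi):
--         if hi <= lo:
--             return False
--         m = lo + (hi - lo) // 2
--         if value[m] == "0":
--             return pref[hi] - pref[lo] != hi - lo
--         return bad(lo, m) or bad(m + 1, hi)
--
--     return True if bad(0, n) else None
-- ===== Notes on version B (the rewrite author's own statement) =====
-- stated objective: alternative
-- what changed: Replaces A's recursion on copied string slices with its all-zero test by string comparison with recursion on index bounds over the original string plus a precomputed prefix count of zero characters, so each all-zero check is a constant-time subtraction and no substring is copied.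
import Mathlib
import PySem

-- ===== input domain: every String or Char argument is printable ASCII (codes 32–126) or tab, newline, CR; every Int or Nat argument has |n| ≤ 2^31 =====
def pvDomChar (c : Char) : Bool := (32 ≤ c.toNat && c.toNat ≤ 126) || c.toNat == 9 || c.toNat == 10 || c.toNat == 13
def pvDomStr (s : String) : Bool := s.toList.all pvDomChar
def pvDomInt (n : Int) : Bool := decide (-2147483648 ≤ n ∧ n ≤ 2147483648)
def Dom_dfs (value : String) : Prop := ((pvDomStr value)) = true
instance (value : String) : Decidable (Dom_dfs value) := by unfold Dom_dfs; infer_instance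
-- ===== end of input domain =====

-- B recurses on index bounds with a precomputed prefix count of zero characters
-- instead of A's recursion on copied string slices; same result (alternative algorithm).

-- ===== PORT A =====
-- A recurses on string slices; the port works on the char list of the string,
-- step for step (value[n//2] is in range since n ≥ 1, so getD is exact there;
-- value[:n//2] / value[n//2+1:] are take / drop since the bounds are nonnegative).
def dfsA (value : List Char) : Option Bool :=
  if value.length ≥ 1 then
    if value.getD (value.length / 2) ' ' = '0' then
      if List.replicate value.length '0' ≠ value then some true else none
    else
      match dfsA (value.take (value.length / 2)) with
      | some true => some true
      | _ =>
        match dfsA (value.drop (value.length / 2 + 1)) with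
        | some true => some true
        | _ => none
  else none
termination_by value.length
decreasing_by
  · simp only [List.length_take]; omega
  · simp only [List.length_drop]; omega

def dfs (value : String) : Option Bool := dfsA value.toList

-- ===== PORT B =====
-- pref[i] = number of '0' among the first i chars (the loop building pref in Source B)
def prefB (l : List Char) : List Nat :=
  List.scanl (fun s c => s + (if c = '0' then 1 else 0)) 0 l

-- bad(lo, hi) of Source B; all indices are provably nonnegative and in range, so Nat
-- and getD are exact for Python's list indexing here.
def badB (l : List Char) (pref : List Nat) (lo hi : Nat) : Bool :=
  if lo < hi then
    if l.getD (lo + (hi - lo) / 2) ' ' = '0' then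
      decide (pref.getD hi 0 - pref.getD lo 0 ≠ hi - lo)
    else
      badB l pref lo (lo + (hi - lo) / 2) || badB l pref (lo + (hi - lo) / 2 + 1) hi
  else false
termination_by hi - lo
decreasing_by
  · have : (hi - lo) / 2 < hi - lo := Nat.div_lt_self (by omega) (by omega)
    omega
  · omega

def dfs_alt (value : String) : Option Bool :=
  if badB value.toList (prefB value.toList) 0 value.toList.length then some true else none

-- ===== PRECONDITION & SPEC =====
def Spec_dfs (value : String) (out : Option Bool) : Prop := out = dfs_alt value
instance (value : String) (out : Option Bool) : Decidable (Spec_dfs value out) := by unfold Spec_dfs; infer_instance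

-- ===== CLAIM (what is proved, stated in full; the proofs are below) =====
def Claim_equal_dfs : Prop := ∀ (value : String), Dom_dfs value → Spec_dfs value (dfs value)

-- ===== LEMMAS AND PROOFS =====

theorem dfsA_nil : dfsA [] = none := by
  rw [dfsA]; simp

theorem prefB_getD (l : List Char) (s i : Nat) (h : i ≤ l.length) :
    (List.scanl (fun s c => s + (if c = '0' then 1 else 0)) s l).getD i 0
      = s + (l.take i).count '0' := by
  induction l generalizing s i with
  | nil =>
    have : i = 0 := by simpa using h
    subst this; simp
  | cons c t ih =>
    cases i with
    | zero => simp
    | succ j =>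
      rw [List.scanl_cons, List.getD_cons_succ, ih _ j (by simpa using h)]
      simp only [List.take_succ_cons, List.count_cons]
      by_cases hc : c = '0' <;> simp [hc] <;> omega

theorem badB_stop (l : List Char) (pref : List Nat) (lo hi : Nat) (h : ¬ lo < hi) :
    badB l pref lo hi = false := by
  rw [badB, if_neg h]

theorem badB_eq (l : List Char) :
    ∀ (k lo hi : Nat), hi - lo ≤ k → hi ≤ l.length →
      dfsA ((l.drop lo).take (hi - lo))
        = (if badB l (prefB l) lo hi then some true else none) := by
  intro k
  induction k with
  | zero =>
    intro lo hi hk hhi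
    have h0 : hi - lo = 0 := by omega
    rw [h0, List.take_zero, dfsA_nil, badB_stop l _ lo hi (by omega)]
    simp
  | succ k ih =>
    intro lo hi hk hhi
    by_cases hlt : lo < hi
    · set seg := (l.drop lo).take (hi - lo) with hseg
      have hlen : seg.length = hi - lo := by
        simp only [hseg, List.length_take, List.length_drop]; omega
      have hmidlt : (hi - lo) / 2 < hi - lo := Nat.div_lt_self (by omega) (by omega)
      have hmid : seg.getD ((hi - lo) / 2) ' ' = l.getD (lo + (hi - lo) / 2) ' ' := by
        simp only [List.getD, hseg]
        rw [List.getElem?_take_of_lt hmidlt, List.getElem?_drop]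
      have hcount : (prefB l).getD hi 0 - (prefB l).getD lo 0 = seg.count '0' := by
        unfold prefB
        rw [prefB_getD l 0 hi hhi, prefB_getD l 0 lo (by omega)]
        have htk : l.take hi = l.take lo ++ seg := by
          rw [hseg, show hi = lo + (hi - lo) from by omega, List.take_add]
          simp
        rw [htk, List.count_append]
        omega
      rw [badB, if_pos hlt, dfsA, if_pos (by omega : seg.length ≥ 1)]
      rw [hlen, hmid]
      by_cases hc : l.getD (lo + (hi - lo) / 2) ' ' = '0'
      · rw [if_pos hc, if_pos hc]
        -- both sides test "the segment is not all zeros"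
        have hiff : (List.replicate (hi - lo) '0' ≠ seg)
            ↔ ((prefB l).getD hi 0 - (prefB l).getD lo 0 ≠ hi - lo) := by
          rw [hcount]
          constructor
          · intro hne hcnt
            apply hne
            symm
            rw [List.eq_replicate_iff]
            exact ⟨hlen, fun b hb => (List.count_eq_length.mp (by omega) b hb).symm⟩
          · intro hne hrepl
            apply hne
            rw [← hlen]
            exact List.count_eq_length.mpr fun b hb => by
              have := hrepl ▸ hb
              simpa [List.eq_of_mem_replicate this]
        simp only [decide_eq_true_eq]
        exact if_congr hiff rfl rfl
      · rw [if_neg hc, if_neg hc]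
        have hleft : seg.take ((hi - lo) / 2)
            = (l.drop lo).take ((lo + (hi - lo) / 2) - lo) := by
          rw [hseg, List.take_take]
          congr 1; omega
        have hright : seg.drop ((hi - lo) / 2 + 1)
            = (l.drop (lo + (hi - lo) / 2 + 1)).take (hi - (lo + (hi - lo) / 2 + 1)) := by
          rw [hseg, List.drop_take, List.drop_drop]
          congr 1 <;> omega
        rw [hleft, hright,
          ih lo (lo + (hi - lo) / 2) (by omega) (by omega),
          ih (lo + (hi - lo) / 2 + 1) hi (by omega) hhi]
        by_cases hb1 : badB l (prefB l) lo (lo + (hi - lo) / 2) <;>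
          by_cases hb2 : badB l (prefB l) (lo + (hi - lo) / 2 + 1) hi <;>
            simp [hb1, hb2]
    · have h0 : hi - lo = 0 := by omega
      rw [h0, List.take_zero, dfsA_nil, badB_stop l _ lo hi hlt]
      simp

-- ===== VERDICT (by name: the statement is the Claim_ definition above) =====
theorem dfs_spec : Claim_equal_dfs := by
  intro value _
  unfold Spec_dfs dfs dfs_alt
  have h := badB_eq value.toList value.toList.length 0 value.toList.length (by omega) (le_refl _)
  rw [Nat.sub_zero, List.drop_zero, List.take_length] at h
  exact h
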